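-- pv_equiv track=rewrite | github.com/Zuleykha22/Python-files | pack/test.py | clean_domain
-- ===== SOURCE A (Python) =====
-- def clean_domain (link):
--   reversed_link = link[::-1]
--   i = 0
--   j = 0
--   if '.co.' in link or '.com.' in link:
--     while i < len(reversed_link):
--       if reversed_link[i] == '.' and j < 2:
--         j += 1
--       elif reversed_link[i] == '.' and j == 2:
--         reversed_link = reversed_link[:i]
--       i += 1
--   else:
--     while i < len(reversed_link):
--       if reversed_link[i] == '.' and j < 1:
--         j += 1
--       elif reversed_link[i] == '.' and j == 1:
--         reversed_link = reversed_link[:i]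
--       i += 1
--   return reversed_link[::-1]
-- ===== SOURCE B (Python) =====
-- def clean_domain(link):
--     parts = link.split('.')
--     if '.co.' in link or '.com.' in link:
--         return '.'.join(parts[-3:])
--     return '.'.join(parts[-2:])
-- ===== Notes on version B (the rewrite author's own statement) =====
-- stated objective: idiomatic
-- what changed: replaces the reverse-then-index dot-counting while loops (which slice the reversed string at the cut-off dot) by splitting the link on the dot separator and joining its last 3 (co/com links) or 2 components
import Mathlib
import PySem

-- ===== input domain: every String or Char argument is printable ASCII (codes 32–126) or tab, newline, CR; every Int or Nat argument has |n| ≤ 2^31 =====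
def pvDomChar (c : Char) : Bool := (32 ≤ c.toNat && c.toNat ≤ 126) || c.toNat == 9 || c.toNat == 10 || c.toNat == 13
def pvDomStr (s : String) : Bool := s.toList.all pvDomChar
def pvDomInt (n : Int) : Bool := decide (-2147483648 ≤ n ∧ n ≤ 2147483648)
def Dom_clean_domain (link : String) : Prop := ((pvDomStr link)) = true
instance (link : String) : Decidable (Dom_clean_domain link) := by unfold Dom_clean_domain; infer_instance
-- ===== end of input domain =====

-- B replaces A's reverse-then-index dot-counting while loops by splitting the link on the
-- dot separator and joining its last 3 (co/com links) or 2 components (idiomatic; measured faster).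


-- ===== PORT A =====
-- A's while loop over the reversed character list: i scans, j counts dots (limit k = 2 or 1),
-- the Python branch 'reversed_link = reversed_link[:i]' is the truncation r.take i.
def cleanLoop (k : Nat) (r : List Char) (i j : Nat) : List Char :=
  if h : i < r.length then
    if r[i] = '.' ∧ j < k then cleanLoop k r (i+1) (j+1)
    else if r[i] = '.' ∧ j = k then cleanLoop k (r.take i) (i+1) j
    else cleanLoop k r (i+1) j
  else r
termination_by r.length - i
decreasing_by
  · omega
  · simp only [List.length_take]; omega
  · omega

def clean_domain (link : String) : String :=
  -- link[::-1] is exact reversal (PySem.List.slice?_none_none_neg_one)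
  let reversed_link := link.toList.reverse
  if PySem.Str.isIn ".co." link || PySem.Str.isIn ".com." link then
    String.ofList (cleanLoop 2 reversed_link 0 0).reverse
  else
    String.ofList (cleanLoop 1 reversed_link 0 0).reverse

-- ===== PORT B =====
def clean_domain_alt (link : String) : String :=
  -- link.split('.'): the separator "." is nonempty, so split? always returns some
  let parts := (PySem.Str.split? link ".").getD []
  if PySem.Str.isIn ".co." link || PySem.Str.isIn ".com." link then
    PySem.Str.join "." (PySem.List.slice parts (some (-3)) none)   -- '.'.join(parts[-3:])
  else
    PySem.Str.join "." (PySem.List.slice parts (some (-2)) none)   -- '.'.join(parts[-2:])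

-- ===== PRECONDITION & SPEC =====
def Spec_clean_domain (link : String) (out : String) : Prop := out = clean_domain_alt link
instance (link : String) (out : String) : Decidable (Spec_clean_domain link out) := by unfold Spec_clean_domain; infer_instance

-- ===== CLAIM (what is proved, stated in full; the proofs are below) =====
def Claim_equal_clean_domain : Prop := ∀ (link : String), Dom_clean_domain link → Spec_clean_domain link (clean_domain link)

-- ===== LEMMAS AND PROOFS =====

-- structural split on '.' (shown equal to PySem.Chars.splitOn · ['.'])
def splitD : List Char → List (List Char)
  | [] => [[]]
  | c :: t =>
    if c = '.' then [] :: splitD t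
    else
      match splitD t with
      | [] => [[c]]
      | h :: rest => (c :: h) :: rest

-- what A's loop computes on the not-yet-scanned part: keep chars, counting dots, cut at dot k+1
def gD (k : Nat) : List Char → Nat → List Char
  | [], _ => []
  | c :: t, j =>
    if c = '.' then (if j < k then c :: gD k t (j+1) else [])
    else c :: gD k t j

theorem splitD_ne_nil (l : List Char) : splitD l ≠ [] := by
  cases l with
  | nil => simp [splitD]
  | cons c t =>
    simp only [splitD]
    split
    · simp
    · cases h : splitD t <;> simp

theorem cleanLoop_of_ge (k : Nat) (r : List Char) (i j : Nat) (h : r.length ≤ i) :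
    cleanLoop k r i j = r := by
  unfold cleanLoop
  rw [dif_neg (by omega)]

theorem cleanLoop_eq_gD (k : Nat) : ∀ n r i j, r.length - i = n → j ≤ k →
    cleanLoop k r i j = r.take i ++ gD k (r.drop i) j := by
  intro n
  induction n with
  | zero =>
    intro r i j hn _
    rw [cleanLoop_of_ge k r i j (by omega)]
    rw [List.drop_eq_nil_of_le (by omega), List.take_of_length_le (by omega)]
    simp [gD]
  | succ n ih =>
    intro r i j hn hj
    have hi : i < r.length := by omega
    have hdrop : r.drop i = r[i] :: r.drop (i+1) := List.drop_eq_getElem_cons hi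
    have htake : r.take (i+1) = r.take i ++ [r[i]] := by
      rw [List.take_succ]
      simp [List.getElem?_eq_getElem hi]
    unfold cleanLoop
    rw [dif_pos hi]
    by_cases hc : r[i] = '.'
    · by_cases hjk : j < k
      · have hih := ih r (i+1) (j+1) (by omega) (by omega)
        rw [if_pos ⟨hc, hjk⟩, hih, hdrop, htake, List.append_assoc]
        simp [gD, hc, hjk]
      · have hjeq : j = k := by omega
        rw [if_neg (by tauto), if_pos ⟨hc, hjeq⟩]
        rw [cleanLoop_of_ge k _ (i+1) j (by rw [List.length_take]; omega)]
        rw [hdrop]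
        simp [gD, hc, hjk]
    · have hih := ih r (i+1) j (by omega) hj
      rw [if_neg (by tauto), if_neg (by tauto), hih, hdrop, htake, List.append_assoc]
      simp [gD, hc]

-- join ['.'] pulls a cons through its head
theorem join_cons_head (c : Char) (h : List Char) (R : List (List Char)) :
    PySem.Chars.join ['.'] ((c :: h) :: R) = c :: PySem.Chars.join ['.'] (h :: R) := by
  cases R with
  | nil => simp [PySem.Chars.join_singleton]
  | cons q Q => rw [PySem.Chars.join_cons_cons, PySem.Chars.join_cons_cons]; simp

theorem gD_eq_join (k : Nat) : ∀ r j, j ≤ k →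
    gD k r j = PySem.Chars.join ['.'] ((splitD r).take (k + 1 - j)) := by
  intro r
  induction r with
  | nil =>
    intro j hj
    have : k + 1 - j = (k - j) + 1 := by omega
    simp [gD, splitD, this, PySem.Chars.join_singleton]
  | cons c t ih =>
    intro j hj
    by_cases hc : c = '.'
    · subst hc
      by_cases hjk : j < k
      · have hm : k + 1 - j = (k + 1 - (j+1)) + 1 := by omega
        obtain ⟨q, Q, hQ⟩ : ∃ q Q, (splitD t).take (k + 1 - (j+1)) = q :: Q := by
          have h1 : k + 1 - (j+1) = (k - (j+1)) + 1 := by omega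
          obtain ⟨q, Q, h2⟩ := List.exists_cons_of_ne_nil (splitD_ne_nil t)
          exact ⟨q, Q.take (k - (j+1)), by rw [h1, h2]; simp⟩
        rw [hm]
        simp only [gD, splitD, if_pos hjk, List.take_succ_cons, reduceIte]
        rw [ih (j+1) (by omega), hQ, PySem.Chars.join_cons_cons]
        simp
      · have hm : k + 1 - j = 1 := by omega
        rw [hm]
        simp [gD, splitD, hjk, PySem.Chars.join_singleton]
    · obtain ⟨h, rest, ht⟩ := List.exists_cons_of_ne_nil (splitD_ne_nil t)
      have hm : k + 1 - j = (k - j) + 1 := by omega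
      simp only [gD, splitD, if_neg hc, ht]
      rw [ih j hj, ht, hm, List.take_succ_cons, List.take_succ_cons, join_cons_head]

-- PySem.Chars.splitOn on separator ['.'] is splitD
theorem splitOn_go_spec : ∀ fuel (l cur : List Char) (acc : List (List Char)),
    l.length < fuel →
    PySem.Chars.splitOn.go ['.'] fuel l cur acc =
      acc.reverse ++ (match splitD l with
        | [] => []
        | h :: rest => (cur.reverse ++ h) :: rest) := by
  intro fuel
  induction fuel with
  | zero => intro l cur acc h; omega
  | succ fuel ih =>
    intro l cur acc h
    cases l with
    | nil => simp [PySem.Chars.splitOn.go, splitD]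
    | cons c t =>
      obtain ⟨h', rest, hsp⟩ := List.exists_cons_of_ne_nil (splitD_ne_nil t)
      by_cases hc : c = '.'
      · subst hc
        have hpre : List.isPrefixOf ['.'] ('.' :: t) = true := by
          simp [List.isPrefixOf]
        simp only [PySem.Chars.splitOn.go, hpre, if_pos, List.length_singleton,
          List.drop_succ_cons, List.drop_zero]
        rw [ih t [] (List.reverse cur :: acc) (by simp at h ⊢; omega)]
        simp [splitD, hsp]
      · have hpre : List.isPrefixOf ['.'] (c :: t) = false := by
          simp [List.isPrefixOf]
          exact Ne.symm hc
        simp only [PySem.Chars.splitOn.go, hpre, Bool.false_eq_true, if_false]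
        rw [ih t (c :: cur) acc (by simp at h ⊢; omega)]
        simp [splitD, hc, hsp]

theorem splitOn_eq_splitD (l : List Char) : PySem.Chars.splitOn l ['.'] = splitD l := by
  unfold PySem.Chars.splitOn
  rw [splitOn_go_spec (l.length + 1) l [] [] (by omega)]
  obtain ⟨h, rest, hsp⟩ := List.exists_cons_of_ne_nil (splitD_ne_nil l)
  simp [hsp]

-- splitting the reverse reverses the components and their order
theorem splitD_snoc (xs : List Char) (c : Char) :
    splitD (xs ++ [c]) =
      if c = '.' then splitD xs ++ [[]]
      else (splitD xs).dropLast ++ [(splitD xs).getLastD [] ++ [c]] := by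
  induction xs with
  | nil => by_cases hc : c = '.' <;> simp [splitD, hc]
  | cons a t ih =>
    obtain ⟨h, rest, hsp⟩ := List.exists_cons_of_ne_nil (splitD_ne_nil t)
    by_cases hc : c = '.'
    · subst hc
      by_cases ha : a = '.'
      · subst ha; simp [splitD, ih]
      · simp [splitD, ha, ih, hsp]
    · by_cases ha : a = '.'
      · subst ha
        cases rest <;> simp [splitD, ih, hsp, hc]
      · cases rest <;> simp [splitD, ha, ih, hsp, hc]

theorem splitD_reverse (r : List Char) :
    splitD r.reverse = ((splitD r).map List.reverse).reverse := by
  induction r with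
  | nil => simp [splitD]
  | cons c t ih =>
    obtain ⟨h, rest, hsp⟩ := List.exists_cons_of_ne_nil (splitD_ne_nil t)
    by_cases hc : c = '.'
    · subst hc
      rw [List.reverse_cons, splitD_snoc, if_pos rfl, ih]
      simp [splitD]
    · rw [List.reverse_cons, splitD_snoc, if_neg hc, ih]
      simp [splitD, hc, hsp]

theorem join_snoc (A : List (List Char)) (b : List Char) (hA : A ≠ []) :
    PySem.Chars.join ['.'] (A ++ [b]) = PySem.Chars.join ['.'] A ++ '.' :: b := by
  induction A with
  | nil => exact absurd rfl hA
  | cons x A ih =>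
    cases A with
    | nil =>
      rw [List.singleton_append, PySem.Chars.join_cons_cons, PySem.Chars.join_singleton,
        PySem.Chars.join_singleton]
      simp
    | cons y B =>
      have ih' := ih (by simp)
      rw [List.cons_append] at ih'
      rw [List.cons_append, List.cons_append, PySem.Chars.join_cons_cons, ih',
        PySem.Chars.join_cons_cons]
      simp

theorem join_reverse (Q : List (List Char)) (hQ : Q ≠ []) :
    PySem.Chars.join ['.'] ((Q.map List.reverse).reverse) = (PySem.Chars.join ['.'] Q).reverse := by
  induction Q with
  | nil => exact absurd rfl hQ
  | cons x A ih =>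
    cases A with
    | nil => simp [PySem.Chars.join_singleton]
    | cons y B =>
      rw [List.map_cons, List.reverse_cons, join_snoc _ _ (by simp),
        ih (by simp), PySem.Chars.join_cons_cons]
      simp

-- per-branch core equality on character lists
theorem core_eq (l : List Char) (k : Nat) :
    (cleanLoop k l.reverse 0 0).reverse =
      PySem.Chars.join ['.']
        ((splitD l).drop ((splitD l).length - (k + 1))) := by
  have h1 : cleanLoop k l.reverse 0 0 = gD k l.reverse 0 := by
    simpa using cleanLoop_eq_gD k l.reverse.length l.reverse 0 0 (by omega) (by omega)
  have h2 : gD k l.reverse 0 =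
      PySem.Chars.join ['.'] ((splitD l.reverse).take (k + 1)) := by
    simpa using gD_eq_join k l.reverse 0 (by omega)
  have h3 : splitD l = ((splitD l.reverse).map List.reverse).reverse := by
    simpa using splitD_reverse l.reverse
  set P := splitD l.reverse with hP
  have hPne : P ≠ [] := splitD_ne_nil _
  have htk : P.take (k + 1) ≠ [] := by
    obtain ⟨a, b, hab⟩ := List.exists_cons_of_ne_nil hPne
    rw [hab]; simp
  have htake_eq : ∀ (X : List (List Char)), X.length = P.length →
      X.take (P.length - (P.length - (k + 1))) = X.take (k + 1) := by
    intro X hX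
    by_cases hm : k + 1 ≤ P.length
    · congr 1; omega
    · rw [List.take_of_length_le (by omega), List.take_of_length_le (by omega)]
  have h4 : (splitD l).drop ((splitD l).length - (k + 1)) =
      ((P.take (k + 1)).map List.reverse).reverse := by
    rw [h3, List.length_reverse, List.length_map, List.drop_reverse, List.length_map,
      htake_eq _ (by simp), List.map_take]
  rw [h1, h2, h4, join_reverse _ htk]

-- ===== VERDICT (by name: the statement is the Claim_ definition above) =====
theorem ofList_inj_helper (a b : List Char) (h : a = b) : String.ofList a = String.ofList b := by
  rw [h]

theorem clean_domain_spec : Claim_equal_clean_domain := by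
  unfold Claim_equal_clean_domain
  intro link _
  unfold Spec_clean_domain clean_domain clean_domain_alt
  have hsplit : (PySem.Str.split? link ".").getD [] =
      (splitD link.toList).map String.ofList := by
    have : PySem.Str.split? link "." =
        some ((PySem.Chars.splitOn link.toList ['.']).map String.ofList) := by
      simp [PySem.Str.split?, PySem.Chars.split?]
    rw [this, Option.getD_some, splitOn_eq_splitD]
  have hjoin : ∀ (Q : List (List Char)),
      PySem.Str.join "." (Q.map String.ofList) =
        String.ofList (PySem.Chars.join ['.'] Q) := by
    intro Q
    unfold PySem.Str.join
    have hsep : ".".toList = ['.'] := by decide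
    rw [hsep]
    congr 1
    simp [List.map_map, Function.comp_def]
  by_cases hco : (PySem.Str.isIn ".co." link || PySem.Str.isIn ".com." link) = true
  · simp only [hco, if_pos]
    rw [hsplit, PySem.List.slice_from_neg_ofNat _ 3 (by norm_num)]
    rw [← List.map_drop, hjoin, List.length_map]
    exact ofList_inj_helper _ _ (core_eq link.toList 2)
  · simp only [Bool.not_eq_true] at hco
    simp only [hco, Bool.false_eq_true, if_false]
    rw [hsplit, PySem.List.slice_from_neg_ofNat _ 2 (by norm_num)]
    rw [← List.map_drop, hjoin, List.length_map]
    exact ofList_inj_helper _ _ (core_eq link.toList 1)
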